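-- pv_equiv track=rewrite | github.com/jpcp13/L2 | 2017/Comptes-Rendus/TP4/Kouadri_Ye/TP4/rsa.py | word2int
-- ===== SOURCE A (Python) =====
-- def word2int(w):
-- 	nbr = '' # ecriture binaire de l'entier nbr
-- 	cplmt = 10 - len(w)
-- 	while cplmt>0:
-- 		w = w + '\0'
-- 		cplmt = cplmt - 1
-- 	for i in range(len(w)):
-- 		bin_c = '{:b}'.format(ord(w[i]))
-- 		# bin_c: string contenant l'ecriture binaire du code ascii de la i-eme lettre du mot w
-- 		cplmt2 = 7 - len(bin_c) # complete avec des 0 devant bin_c si plus petit que 7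
-- 		while cplmt2>0:
-- 			nbr = nbr + '0'
-- 			cplmt2 = cplmt2 - 1
-- 		for k in range(len(bin_c)):
-- 			nbr = nbr + bin_c[k]
-- 	return int(nbr, 2) # convertir nbr de base2 en base10 et le retourner
-- ===== SOURCE B (Python) =====
-- def word2int(w):
--     # One pass, numeric accumulator: pad to 10 chars with NUL, then
--     # treat the word as base-128 digits (7 bits per character).
--     w = w.ljust(10, '\0')
--     nbr = 0
--     for c in w:
--         nbr = nbr * 128 + ord(c)
--     return nbr
-- ===== Notes on version B (the rewrite author's own statement) =====
-- stated objective: simpler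
-- what changed: Replaces A's two nested padding loops plus per-character binary-string construction and final base-2 string reparse by a single numeric fold nbr = nbr*128 + ord(c) over the NUL-padded word.
import Mathlib
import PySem

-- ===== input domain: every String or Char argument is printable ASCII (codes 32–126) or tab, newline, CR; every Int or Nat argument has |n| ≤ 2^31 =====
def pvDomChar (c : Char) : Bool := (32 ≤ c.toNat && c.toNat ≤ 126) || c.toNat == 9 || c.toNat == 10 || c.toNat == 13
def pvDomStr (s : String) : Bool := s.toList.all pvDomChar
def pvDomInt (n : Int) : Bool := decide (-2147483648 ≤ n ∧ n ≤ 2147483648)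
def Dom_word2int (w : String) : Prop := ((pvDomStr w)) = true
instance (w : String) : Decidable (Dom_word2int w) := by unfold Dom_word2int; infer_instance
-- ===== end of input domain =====

-- B replaces A's build-a-binary-string-then-reparse scheme by one numeric base-128 fold (simpler).

-- ===== PORT A =====
-- while cplmt>0: w = w + '\0'; cplmt = cplmt - 1
def padNul (w : List Char) (cplmt : Int) : List Char :=
  if 0 < cplmt then padNul (w ++ ['\x00']) (cplmt - 1) else w
termination_by cplmt.toNat
decreasing_by omega

-- while cplmt2>0: nbr = nbr + '0'; cplmt2 = cplmt2 - 1
def zeroPad (nbr : List Char) (cplmt2 : Int) : List Char :=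
  if 0 < cplmt2 then zeroPad (nbr ++ ['0']) (cplmt2 - 1) else nbr
termination_by cplmt2.toNat
decreasing_by omega

-- '{:b}'.format(n): hand-ported (PySem has no binary formatting); exact for every n : Nat
def pyBinAux : Nat → Nat → List Char
  | 0, _ => []
  | f + 1, n => if n = 0 then [] else pyBinAux f (n / 2) ++ [if n % 2 = 1 then '1' else '0']

def pyBin (n : Nat) : List Char := if n = 0 then ['0'] else pyBinAux (n + 1) n

-- int(s, 2): hand-ported positional binary parse; exact on the nonempty '0'/'1'-only
-- strings this program builds (no sign, whitespace, underscore or 0b prefix ever occurs in nbr)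
def parseBin (cs : List Char) : Int :=
  cs.foldl (fun a c => 2 * a + (if c = '1' then 1 else 0)) 0

def word2int (w : String) : Int :=
  let w1 := padNul w.toList (10 - (w.toList.length : Int))
  let nbr := (PySem.List.pyRange 0 (w1.length : Int) 1).foldl
      (fun nbr i =>
        let bin_c := pyBin (PySem.List.pyGetD w1 i ' ').toNat
        let nbr2 := zeroPad nbr (7 - (bin_c.length : Int))
        bin_c.foldl (fun n k => n ++ [k]) nbr2)
      ([] : List Char)
  parseBin nbr

-- ===== PORT B =====
-- w.ljust(10, '\0'): hand-ported (pad on the right up to length 10); exact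
def word2int_alt (w : String) : Int :=
  let padded := w.toList ++ List.replicate (10 - w.toList.length) '\x00'
  padded.foldl (fun n c => n * 128 + (c.toNat : Int)) 0

-- ===== PRECONDITION & SPEC =====
def Spec_word2int (w : String) (out : Int) : Prop := out = word2int_alt w
instance (w : String) (out : Int) : Decidable (Spec_word2int w out) := by unfold Spec_word2int; infer_instance

-- ===== CLAIM (what is proved, stated in full; the proofs are below) =====
def Claim_equal_word2int : Prop := ∀ (w : String), Dom_word2int w → Spec_word2int w (word2int w)

-- ===== LEMMAS AND PROOFS =====

theorem padNul_eq (k : Nat) : ∀ (c : Int), c.toNat = k → ∀ w, padNul w c = w ++ List.replicate k '\x00' := by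
  induction k with
  | zero => intro c hc w; rw [padNul]; simp; omega
  | succ k ih =>
      intro c hc w
      rw [padNul]
      rw [if_pos (by omega)]
      rw [ih (c - 1) (by omega)]
      simp [List.replicate_succ]

theorem zeroPad_eq (k : Nat) : ∀ (c : Int), c.toNat = k → ∀ w, zeroPad w c = w ++ List.replicate k '0' := by
  induction k with
  | zero => intro c hc w; rw [zeroPad]; simp; omega
  | succ k ih =>
      intro c hc w
      rw [zeroPad]
      rw [if_pos (by omega)]
      rw [ih (c - 1) (by omega)]
      simp [List.replicate_succ]

-- the 7-bit block A emits for one character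
def blockA (c : Char) : List Char :=
  List.replicate (7 - ((pyBin c.toNat).length : Int)).toNat '0' ++ pyBin c.toNat

theorem nbr_eq_flatMap (cs : List Char) : ∀ (nbr0 : List Char),
    cs.foldl
      (fun nbr c =>
        let bin_c := pyBin c.toNat
        let nbr2 := zeroPad nbr (7 - (bin_c.length : Int))
        bin_c.foldl (fun n k => n ++ [k]) nbr2) nbr0
    = nbr0 ++ cs.flatMap blockA := by
  induction cs with
  | nil => intro nbr0; simp
  | cons c cs ih =>
      intro nbr0
      simp only [List.foldl_cons, List.flatMap_cons]
      rw [ih]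
      rw [PySem.List.foldl_append_singleton]
      rw [zeroPad_eq (7 - ((pyBin c.toNat).length : Int)).toNat _ rfl]
      simp [blockA, List.append_assoc]

def pF (a : Int) (cs : List Char) : Int :=
  cs.foldl (fun a c => 2 * a + (if c = '1' then 1 else 0)) a

theorem pF_append (a : Int) (xs ys : List Char) : pF a (xs ++ ys) = pF (pF a xs) ys := by
  simp [pF, List.foldl_append]

theorem pF_replicate0 (k : Nat) : ∀ a, pF a (List.replicate k '0') = a * 2 ^ k := by
  induction k with
  | zero => intro a; simp [pF]
  | succ k ih =>
      intro a
      rw [List.replicate_succ]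
      show pF (2 * a + 0) (List.replicate k '0') = a * 2 ^ (k + 1)
      rw [ih]
      ring

theorem pyBinAux_spec (f : Nat) : ∀ n a, n ≤ f →
    pF a (pyBinAux f n) = a * 2 ^ (pyBinAux f n).length + n := by
  induction f with
  | zero => intro n a h; interval_cases n; simp [pyBinAux, pF]
  | succ f ih =>
      intro n a h
      by_cases h0 : n = 0
      · simp [pyBinAux, h0, pF]
      · simp only [pyBinAux, if_neg h0]
        rw [pF_append, ih (n / 2) a (by omega)]
        have hb : pF (a * 2 ^ (pyBinAux f (n / 2)).length + ↑(n / 2))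
            [if n % 2 = 1 then '1' else '0']
            = 2 * (a * 2 ^ (pyBinAux f (n / 2)).length + ↑(n / 2)) + ((n % 2 : Nat) : Int) := by
          rcases Nat.mod_two_eq_zero_or_one n with h2 | h2 <;> simp [pF, h2]
        rw [hb]
        simp only [List.length_append, List.length_singleton]
        have hn : (n : Int) = 2 * ↑(n / 2) + ↑(n % 2) := by
          have := Nat.div_add_mod n 2; push_cast; omega
        rw [hn]
        ring

theorem pyBinAux_len (f : Nat) : ∀ n k, n < 2 ^ k → (pyBinAux f n).length ≤ k := by
  induction f with
  | zero => intro n k _; simp [pyBinAux]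
  | succ f ih =>
      intro n k h
      by_cases h0 : n = 0
      · simp [pyBinAux, h0]
      · simp only [pyBinAux, if_neg h0, List.length_append, List.length_singleton]
        have hk : k ≠ 0 := by
          rintro rfl; simp at h; omega
        have := ih (n / 2) (k - 1) (by
          have : 2 ^ k = 2 * 2 ^ (k - 1) := by
            conv_lhs => rw [show k = (k - 1) + 1 by omega]
            ring
          omega)
        omega

theorem pF_blockA (a : Int) (c : Char) (hc : c.toNat < 128) :
    pF a (blockA c) = a * 128 + (c.toNat : Int) := by
  unfold blockA pyBin
  by_cases h0 : c.toNat = 0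
  · rw [if_pos h0, h0]
    simp [pF]
    ring
  · rw [if_neg h0]
    have hlen : (pyBinAux (c.toNat + 1) c.toNat).length ≤ 7 :=
      pyBinAux_len _ _ 7 (by omega)
    rw [pF_append, pF_replicate0, pyBinAux_spec _ _ _ (by omega)]
    have ht : (7 - ((pyBinAux (c.toNat + 1) c.toNat).length : Int)).toNat
        = 7 - (pyBinAux (c.toNat + 1) c.toNat).length := by omega
    rw [ht]
    rw [mul_assoc, ← pow_add]
    rw [show 7 - (pyBinAux (c.toNat + 1) c.toNat).length + (pyBinAux (c.toNat + 1) c.toNat).length = 7 by omega]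
    norm_num

theorem pF_flatMap (cs : List Char) : ∀ a, (∀ c ∈ cs, c.toNat < 128) →
    pF a (cs.flatMap blockA) = cs.foldl (fun n c => n * 128 + (c.toNat : Int)) a := by
  induction cs with
  | nil => intro a _; simp [pF]
  | cons c cs ih =>
      intro a h
      simp only [List.flatMap_cons, List.foldl_cons]
      rw [pF_append, pF_blockA a c (h c (by simp))]
      exact ih _ (fun c hc => h c (by simp [hc]))

-- ===== VERDICT (by name: the statement is the Claim_ definition above) =====
theorem word2int_spec : Claim_equal_word2int := by
  intro w hdom
  unfold Spec_word2int word2int word2int_alt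
  simp only []
  rw [padNul_eq (10 - (w.toList.length : Int)).toNat _ rfl]
  have hfold := PySem.List.foldl_pyRange_zero_pyGetD'
      (w.toList ++ List.replicate (10 - (w.toList.length : Int)).toNat '\x00') ' '
      (fun nbr c =>
        (pyBin c.toNat).foldl (fun n k => n ++ [k])
          (zeroPad nbr (7 - ((pyBin c.toNat).length : Int)))) []
  beta_reduce at hfold
  rw [hfold]
  rw [nbr_eq_flatMap]
  simp only [List.nil_append]
  have hlt : ∀ c ∈ w.toList ++ List.replicate (10 - (w.toList.length : Int)).toNat '\x00',
      c.toNat < 128 := by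
    intro c hc
    rcases List.mem_append.mp hc with h | h
    · have := List.all_eq_true.mp hdom c h
      simp [pvDomChar] at this
      omega
    · have := List.eq_of_mem_replicate h
      subst this; decide
  rw [show parseBin ((w.toList ++ List.replicate (10 - (w.toList.length : Int)).toNat '\x00').flatMap blockA)
      = pF 0 ((w.toList ++ List.replicate (10 - (w.toList.length : Int)).toNat '\x00').flatMap blockA) from rfl]
  rw [pF_flatMap _ 0 hlt]
  rw [show (10 - (w.toList.length : Int)).toNat = 10 - w.toList.length by omega]
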